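-- pv_equiv track=rewrite | github.com/D1P0/AoC-2020 | src/day_06.py | parse_input_01
-- ===== SOURCE A (Python) =====
-- from typing import List, Set
--
-- ParsedInput = List[Set[str]]
--
-- def parse_input_01(lst: List[str]) -> List[ParsedInput]:
--     result: List[ParsedInput] = []
--     answers: ParsedInput = []
--     for line in lst:
--         if line == "":
--             result.append(answers)
--             answers = []
--         else:
--             answers.append(set(line))
--     if answers:
--         result.append(answers)
--     return result
-- ===== SOURCE B (Python) =====
-- from typing import List, Set
--
-- ParsedInput = List[Set[str]]
--
-- def parse_input_01(lst: List[str]) -> List[ParsedInput]: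
--     # Recursive divide-at-delimiter: split off the prefix before the first blank
--     # line as one group (possibly empty) and recurse on the remainder; with no
--     # blank left, the whole tail is the final group, emitted only if non-empty.
--     if "" in lst:
--         i = lst.index("")
--         return [[set(s) for s in lst[:i]]] + parse_input_01(lst[i + 1:])
--     group = [set(s) for s in lst]
--     return [group] if group else []
-- ===== Notes on version B (the rewrite author's own statement) =====
-- stated objective: alternative
-- what changed: B replaces A's single-pass accumulator loop by recursive divide-at-delimiter: it finds the first blank line with index, slices the prefix off as one group, and recurses on the remainder, emitting the blank-free tail as a final group only when non-empty.
import Mathlib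
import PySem

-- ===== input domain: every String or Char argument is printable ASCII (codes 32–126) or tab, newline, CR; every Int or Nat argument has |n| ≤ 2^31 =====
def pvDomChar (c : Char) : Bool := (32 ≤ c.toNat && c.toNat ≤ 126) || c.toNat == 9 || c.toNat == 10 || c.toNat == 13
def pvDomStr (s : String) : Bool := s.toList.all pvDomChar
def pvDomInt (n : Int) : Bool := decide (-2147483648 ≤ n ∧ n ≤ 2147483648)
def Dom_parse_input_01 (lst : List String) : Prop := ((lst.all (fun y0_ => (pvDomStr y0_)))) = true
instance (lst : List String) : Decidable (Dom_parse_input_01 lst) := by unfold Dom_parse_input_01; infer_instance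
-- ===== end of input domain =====

-- B groups by recursive divide-at-the-first-blank with slices instead of A's one-pass
-- accumulator loop; same cost, a different decomposition of the same grouping.

-- set(line): the distinct characters of line, in first-occurrence order, as one-char strings
def pvSetOfStr (s : String) : List String :=
  PySem.Set.ofList (s.toList.map (fun c => String.singleton c))

-- ===== PORT A =====
def pvStepA (p : List (List (List String)) × List (List String)) (line : String) :
    List (List (List String)) × List (List String) :=
  if line == "" then (p.1 ++ [p.2], []) else (p.1, p.2 ++ [pvSetOfStr line])

def parse_input_01 (lst : List String) : List (List (List String)) :=
  let p := lst.foldl pvStepA ([], [])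
  if p.2 == [] then p.1 else p.1 ++ [p.2]

-- ===== PORT B =====
def parse_input_01_alt (lst : List String) : List (List (List String)) :=
  match h : PySem.List.index? lst "" with
  | some i =>
      [(PySem.List.slice lst none (some (i : Int))).map pvSetOfStr] ++
        parse_input_01_alt (PySem.List.slice lst (some ((i : Int) + 1)) none)
  | none =>
      let group := lst.map pvSetOfStr
      if group ≠ [] then [group] else []
termination_by lst.length
decreasing_by
  have hi := PySem.List.getElem_of_index?_eq_some h
  obtain ⟨hk, -, -⟩ := hi
  have : ((i : Int) + 1) = ((i + 1 : Nat) : Int) := by push_cast; ring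
  rw [this, PySem.List.slice_from_natCast, List.length_drop]
  omega

-- ===== PRECONDITION & SPEC =====
def Spec_parse_input_01 (lst : List String) (out : List (List (List String))) : Prop := out = parse_input_01_alt lst
instance (lst : List String) (out : List (List (List String))) : Decidable (Spec_parse_input_01 lst out) := by unfold Spec_parse_input_01; infer_instance

-- ===== CLAIM (what is proved, stated in full; the proofs are below) =====
def Claim_equal_parse_input_01 : Prop := ∀ (lst : List String), Dom_parse_input_01 lst → Spec_parse_input_01 lst (parse_input_01 lst)

-- ===== LEMMAS AND PROOFS =====

-- A's fold only ever appends to the result component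
theorem pvFoldPrefix (l : List String) :
    ∀ (res : List (List (List String))) (ans : List (List String)),
      l.foldl pvStepA (res, ans) =
        (res ++ (l.foldl pvStepA ([], ans)).1, (l.foldl pvStepA ([], ans)).2) := by
  induction l with
  | nil => intro res ans; simp
  | cons s r ih =>
    intro res ans
    simp only [List.foldl_cons, pvStepA]
    by_cases hs : s = ""
    · simp only [hs, beq_self_eq_true, if_true, List.nil_append]
      rw [ih (res ++ [ans]) [], ih [ans] []]; simp
    · simp only [show (s == "") = false by simp [hs], Bool.false_eq_true, if_false]
      exact ih res (ans ++ [pvSetOfStr s])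

-- over a blank-free block A's fold just appends the char-sets to the open group
theorem pvFoldNoBlank (l : List String) (hl : "" ∉ l) :
    ∀ (res : List (List (List String))) (ans : List (List String)),
      l.foldl pvStepA (res, ans) = (res, ans ++ l.map pvSetOfStr) := by
  induction l with
  | nil => intro res ans; simp
  | cons s r ih =>
    intro res ans
    have hs : s ≠ "" := fun h => hl (h ▸ List.mem_cons_self ..)
    have hr : "" ∉ r := fun h => hl (List.mem_cons_of_mem _ h)
    simp only [List.foldl_cons, pvStepA, show (s == "") = false by simp [hs],
      Bool.false_eq_true, if_false, List.map_cons]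
    rw [ih hr]; simp

-- A splits off the group before the first blank line
theorem pvSplitA (pre suf : List String) (hpre : "" ∉ pre) :
    parse_input_01 (pre ++ "" :: suf) = [pre.map pvSetOfStr] ++ parse_input_01 suf := by
  simp only [parse_input_01, List.foldl_append, List.foldl_cons, pvStepA]
  rw [pvFoldNoBlank pre hpre [] []]
  simp only [List.nil_append, beq_self_eq_true, if_true]
  rw [pvFoldPrefix suf [pre.map pvSetOfStr] []]
  by_cases h2 : (suf.foldl pvStepA ([], [])).2 = [] <;> simp [h2]

-- non-dependent unfolding of B's recursion
theorem pvAltEq (lst : List String) :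
    parse_input_01_alt lst =
      match PySem.List.index? lst "" with
      | some i =>
          [(PySem.List.slice lst none (some (i : Int))).map pvSetOfStr] ++
            parse_input_01_alt (PySem.List.slice lst (some ((i : Int) + 1)) none)
      | none =>
          if lst.map pvSetOfStr ≠ [] then [lst.map pvSetOfStr] else [] := by
  rw [parse_input_01_alt]
  cases h : PySem.List.index? lst "" <;> simp

theorem pvMain (lst : List String) : parse_input_01 lst = parse_input_01_alt lst := by
  induction hn : lst.length using Nat.strong_induction_on generalizing lst with
  | _ n ih =>
    rw [pvAltEq]
    cases h : PySem.List.index? lst "" with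
    | some i =>
      dsimp only
      obtain ⟨pre, suf, hsplit, hlen, hnotin⟩ := (PySem.List.index?_eq_some_iff lst "" i).mp h
      have hcast : ((i : Int) + 1) = ((i + 1 : Nat) : Int) := by push_cast; ring
      rw [hcast, PySem.List.slice_from_natCast, PySem.List.slice_to_natCast]
      have htake : lst.take i = pre := by
        subst hsplit; subst hlen; simp
      have hdrop : lst.drop (i + 1) = suf := by
        subst hsplit; subst hlen
        rw [show pre.length + 1 = (pre ++ [("" : String)]).length by simp,
          show pre ++ "" :: suf = (pre ++ [""]) ++ suf by simp]
        exact List.drop_left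
      have hlt : suf.length < n := by
        subst hn; rw [hsplit]; simp; omega
      rw [htake, hdrop, hsplit, pvSplitA pre suf hnotin, ← ih suf.length hlt suf rfl]
    | none =>
      dsimp only
      have hnot : "" ∉ lst := (PySem.List.index?_eq_none_iff lst "").mp h
      simp only [parse_input_01]
      rw [pvFoldNoBlank lst hnot [] []]
      by_cases hm : lst.map pvSetOfStr = []
      · simp [hm]
      · have hne : lst ≠ [] := fun e => hm (by simp [e])
        simp [hm, hne]

-- ===== VERDICT (by name: the statement is the Claim_ definition above) =====
theorem parse_input_01_spec : Claim_equal_parse_input_01 := by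
  intro lst _
  show parse_input_01 lst = parse_input_01_alt lst
  exact pvMain lst
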